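-- pv_equiv track=rewrite | github.com/agh-space-systems-rover/kalman_robot | kalman_master/kalman_master/ros_link_serialization.py | does_path_match_any_prefix
-- ===== SOURCE A (Python) =====
-- def does_path_match_any_prefix(prefixes: list[str], path: str) -> bool:
--     path_items = path.split(".") if path else []
--
--     for prefix in prefixes:
--         prefix_items = prefix.split(".") if prefix else []
--
--         if (
--             path_items[: len(prefix_items)] == prefix_items
--             or prefix_items[: len(path_items)] == path_items
--         ):
--             return True
--     return False
-- ===== SOURCE B (Python) =====
-- def _segments_agree(xs, ys):
--     # recursive common-prefix test: true when either list runs out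
--     if not xs or not ys:
--         return True
--     return xs[0] == ys[0] and _segments_agree(xs[1:], ys[1:])
--
--
-- def does_path_match_any_prefix(prefixes: list[str], path: str) -> bool:
--     path_items = path.split(".") if path else []
--     return any(
--         _segments_agree(path_items, prefix.split(".") if prefix else [])
--         for prefix in prefixes
--     )
-- ===== Notes on version B (the rewrite author's own statement) =====
-- stated objective: simpler
-- what changed: The two slice-and-compare equality tests per prefix are replaced by one recursive element-wise common-prefix test (any(...) over prefixes), which stops at the shorter list; no slices are built.
import Mathlib
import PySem

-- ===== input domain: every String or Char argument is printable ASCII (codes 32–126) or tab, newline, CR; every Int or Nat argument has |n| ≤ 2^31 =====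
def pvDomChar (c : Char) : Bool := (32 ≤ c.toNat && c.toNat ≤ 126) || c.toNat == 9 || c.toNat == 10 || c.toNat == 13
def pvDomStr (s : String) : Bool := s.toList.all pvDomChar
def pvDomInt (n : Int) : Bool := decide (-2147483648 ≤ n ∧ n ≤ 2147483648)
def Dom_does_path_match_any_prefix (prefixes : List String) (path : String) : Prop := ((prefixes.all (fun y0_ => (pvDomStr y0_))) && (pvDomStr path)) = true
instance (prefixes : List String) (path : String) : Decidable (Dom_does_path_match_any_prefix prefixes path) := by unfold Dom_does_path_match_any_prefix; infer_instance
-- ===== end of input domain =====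

-- B replaces A's two slice-equality tests per prefix with one recursive element-wise
-- common-prefix test (objective: simpler).

-- ===== PORT A =====
-- the for-loop over prefixes with early return True
def pvALoop (path_items : List String) : List String → Bool
  | [] => false
  | pfx :: rest =>
    let prefix_items := if pfx ≠ "" then (PySem.Str.split? pfx ".").getD [] else []
    if path_items.take prefix_items.length == prefix_items
        || prefix_items.take path_items.length == path_items then
      true
    else
      pvALoop path_items rest

def does_path_match_any_prefix (prefixes : List String) (path : String) : Bool :=
  let path_items := if path ≠ "" then (PySem.Str.split? path ".").getD [] else []
  pvALoop path_items prefixes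

-- ===== PORT B =====
-- recursive common-prefix test: true when either list runs out
def pvSegmentsAgree : List String → List String → Bool
  | [], _ => true
  | _ :: _, [] => true
  | x :: xs, y :: ys => x == y && pvSegmentsAgree xs ys

def does_path_match_any_prefix_alt (prefixes : List String) (path : String) : Bool :=
  let path_items := if path ≠ "" then (PySem.Str.split? path ".").getD [] else []
  prefixes.any (fun pfx =>
    pvSegmentsAgree path_items (if pfx ≠ "" then (PySem.Str.split? pfx ".").getD [] else []))

-- ===== PRECONDITION & SPEC =====
def Spec_does_path_match_any_prefix (prefixes : List String) (path : String) (out : Bool) : Prop := out = does_path_match_any_prefix_alt prefixes path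
instance (prefixes : List String) (path : String) (out : Bool) : Decidable (Spec_does_path_match_any_prefix prefixes path out) := by unfold Spec_does_path_match_any_prefix; infer_instance

-- ===== CLAIM (what is proved, stated in full; the proofs are below) =====
def Claim_equal_does_path_match_any_prefix : Prop := ∀ (prefixes : List String) (path : String), Dom_does_path_match_any_prefix prefixes path → Spec_does_path_match_any_prefix prefixes path (does_path_match_any_prefix prefixes path)

-- ===== LEMMAS AND PROOFS =====

-- A's per-prefix condition equals B's common-prefix test
theorem slice_test_eq_segmentsAgree (xs : List String) :
    ∀ ys : List String,
      (xs.take ys.length == ys || ys.take xs.length == xs) = pvSegmentsAgree xs ys := by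
  induction xs with
  | nil =>
    intro ys
    cases ys <;> simp [pvSegmentsAgree]
  | cons x xs ih =>
    intro ys
    cases ys with
    | nil => simp [pvSegmentsAgree]
    | cons y ys =>
      simp only [List.length_cons, List.take_succ_cons, pvSegmentsAgree]
      by_cases h : x = y
      · subst h
        simp [← ih ys, Bool.and_or_distrib_left]
      · have hx : (x == y) = false := by simpa using h
        have hy : (y == x) = false := by simpa using fun e => h e.symm
        simp [hx, hy]

theorem pvALoop_eq_any (path_items : List String) (prefixes : List String) :
    pvALoop path_items prefixes =
      prefixes.any (fun pfx =>
        pvSegmentsAgree path_items (if pfx ≠ "" then (PySem.Str.split? pfx ".").getD [] else [])) := by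
  induction prefixes with
  | nil => rfl
  | cons pfx rest ih =>
    simp only [pvALoop, List.any_cons, ← ih,
      slice_test_eq_segmentsAgree path_items (if pfx ≠ "" then (PySem.Str.split? pfx ".").getD [] else [])]
    split <;> simp_all

-- ===== VERDICT (by name: the statement is the Claim_ definition above) =====
theorem does_path_match_any_prefix_spec : Claim_equal_does_path_match_any_prefix := by
  intro prefixes path _
  unfold Spec_does_path_match_any_prefix does_path_match_any_prefix does_path_match_any_prefix_alt
  exact pvALoop_eq_any _ _
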